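-- pv_equiv track=rewrite | github.com/GameMasterRPG/GalacticConsequence | services/npc_memory.py | build_personality_description
-- ===== SOURCE A (Python) =====
-- def build_personality_description(personality_traits):
--     """
--     Build human-readable personality description from traits
--     """
--     if not personality_traits:
--         return "A typical individual with no distinctive personality traits."
--
--     # Group traits by category
--     social_traits = [t for t in personality_traits if t in ['friendly', 'suspicious', 'honest', 'deceitful', 'tolerant', 'xenophobic']]
--     behavioral_traits = [t for t in personality_traits if t in ['greedy', 'loyal', 'ambitious', 'cowardly', 'brave', 'aggressive', 'peaceful']]
--     affiliation_traits = [t for t in personality_traits if t in ['imperial_sympathizer', 'rebel_sympathizer', 'criminal', 'law_abiding']]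
--     force_traits = [t for t in personality_traits if t in ['force_sensitive', 'jedi', 'sith', 'dark_side', 'light_side']]
--     profession_traits = [t for t in personality_traits if t in ['merchant', 'noble', 'bounty_hunter', 'pilot', 'mechanic', 'doctor', 'scholar']]
--
--     description_parts = []
--
--     if social_traits:
--         description_parts.append(f"Socially: {', '.join(social_traits)}")
--     if behavioral_traits:
--         description_parts.append(f"Behavior: {', '.join(behavioral_traits)}")
--     if affiliation_traits:
--         description_parts.append(f"Affiliations: {', '.join(affiliation_traits)}")
--     if force_traits:
--         description_parts.append(f"Force connection: {', '.join(force_traits)}")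
--     if profession_traits:
--         description_parts.append(f"Profession: {', '.join(profession_traits)}")
--
--     return ". ".join(description_parts) + "."
-- ===== SOURCE B (Python) =====
-- def build_personality_description(personality_traits):
--     """
--     Build human-readable personality description from traits
--     """
--     if not personality_traits:
--         return "A typical individual with no distinctive personality traits."
--
--     social = []
--     behavioral = []
--     affiliation = []
--     force = []
--     profession = []
--     for t in personality_traits:
--         if t in ['friendly', 'suspicious', 'honest', 'deceitful', 'tolerant', 'xenophobic']:
--             social.append(t)
--         elif t in ['greedy', 'loyal', 'ambitious', 'cowardly', 'brave', 'aggressive', 'peaceful']: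
--             behavioral.append(t)
--         elif t in ['imperial_sympathizer', 'rebel_sympathizer', 'criminal', 'law_abiding']:
--             affiliation.append(t)
--         elif t in ['force_sensitive', 'jedi', 'sith', 'dark_side', 'light_side']:
--             force.append(t)
--         elif t in ['merchant', 'noble', 'bounty_hunter', 'pilot', 'mechanic', 'doctor', 'scholar']:
--             profession.append(t)
--
--     description_parts = []
--     for label, bucket in (("Socially", social), ("Behavior", behavioral),
--                           ("Affiliations", affiliation), ("Force connection", force),
--                           ("Profession", profession)):
--         if bucket:
--             description_parts.append(label + ": " + ", ".join(bucket))
--     return ". ".join(description_parts) + "."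
-- ===== Notes on version B (the rewrite author's own statement) =====
-- stated objective: alternative
-- what changed: Replaces five separate list-comprehension passes over personality_traits (one per category) with a single pass that dispatches each trait into one of five bucket lists via an if/elif chain, then assembles the labelled parts in one data-driven loop over (label, bucket) pairs.
import Mathlib
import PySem

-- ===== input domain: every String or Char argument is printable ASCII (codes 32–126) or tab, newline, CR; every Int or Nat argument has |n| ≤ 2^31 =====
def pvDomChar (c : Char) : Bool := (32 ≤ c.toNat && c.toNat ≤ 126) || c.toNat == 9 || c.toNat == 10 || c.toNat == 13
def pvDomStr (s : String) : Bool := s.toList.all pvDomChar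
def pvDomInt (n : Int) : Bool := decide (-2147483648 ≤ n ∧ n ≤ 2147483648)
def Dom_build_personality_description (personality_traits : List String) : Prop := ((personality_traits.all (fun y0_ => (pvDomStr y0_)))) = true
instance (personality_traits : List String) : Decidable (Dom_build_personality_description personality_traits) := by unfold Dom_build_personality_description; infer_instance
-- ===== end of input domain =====

-- B replaces A's five list-comprehension passes by a single bucketing pass (if/elif chain)
-- plus one data-driven assembly loop; same output, objective: alternative decomposition.

-- the five literal category lists, shared vocabulary of both programs
def pvSocial : List String := ["friendly", "suspicious", "honest", "deceitful", "tolerant", "xenophobic"]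
def pvBehavioral : List String := ["greedy", "loyal", "ambitious", "cowardly", "brave", "aggressive", "peaceful"]
def pvAffiliation : List String := ["imperial_sympathizer", "rebel_sympathizer", "criminal", "law_abiding"]
def pvForce : List String := ["force_sensitive", "jedi", "sith", "dark_side", "light_side"]
def pvProfession : List String := ["merchant", "noble", "bounty_hunter", "pilot", "mechanic", "doctor", "scholar"]

-- ===== PORT A =====
def build_personality_description (personality_traits : List String) : String :=
  if personality_traits = [] then
    "A typical individual with no distinctive personality traits."
  else
    let social_traits := personality_traits.filter (fun t => pvSocial.contains t)
    let behavioral_traits := personality_traits.filter (fun t => pvBehavioral.contains t)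
    let affiliation_traits := personality_traits.filter (fun t => pvAffiliation.contains t)
    let force_traits := personality_traits.filter (fun t => pvForce.contains t)
    let profession_traits := personality_traits.filter (fun t => pvProfession.contains t)
    let description_parts : List String := []
    let description_parts := if social_traits ≠ [] then description_parts ++ ["Socially: " ++ PySem.Str.join ", " social_traits] else description_parts
    let description_parts := if behavioral_traits ≠ [] then description_parts ++ ["Behavior: " ++ PySem.Str.join ", " behavioral_traits] else description_parts
    let description_parts := if affiliation_traits ≠ [] then description_parts ++ ["Affiliations: " ++ PySem.Str.join ", " affiliation_traits] else description_parts
    let description_parts := if force_traits ≠ [] then description_parts ++ ["Force connection: " ++ PySem.Str.join ", " force_traits] else description_parts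
    let description_parts := if profession_traits ≠ [] then description_parts ++ ["Profession: " ++ PySem.Str.join ", " profession_traits] else description_parts
    PySem.Str.join ". " description_parts ++ "."

-- ===== PORT B =====
-- one step of B's bucketing loop: dispatch trait t into the first matching bucket
def pvStep (acc : List String × List String × List String × List String × List String)
    (t : String) : List String × List String × List String × List String × List String :=
  match acc with
  | (s, b, af, f, p) =>
    if pvSocial.contains t then (s ++ [t], b, af, f, p)
    else if pvBehavioral.contains t then (s, b ++ [t], af, f, p)
    else if pvAffiliation.contains t then (s, b, af ++ [t], f, p)
    else if pvForce.contains t then (s, b, af, f ++ [t], p)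
    else if pvProfession.contains t then (s, b, af, f, p ++ [t])
    else (s, b, af, f, p)

def build_personality_description_alt (personality_traits : List String) : String :=
  if personality_traits = [] then
    "A typical individual with no distinctive personality traits."
  else
    match personality_traits.foldl pvStep ([], [], [], [], []) with
    | (social, behavioral, affiliation, force, profession) =>
      let pairs : List (String × List String) :=
        [("Socially", social), ("Behavior", behavioral), ("Affiliations", affiliation),
         ("Force connection", force), ("Profession", profession)]
      let description_parts := pairs.foldl
        (fun acc lb => if lb.2 ≠ [] then acc ++ [lb.1 ++ ": " ++ PySem.Str.join ", " lb.2] else acc) []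
      PySem.Str.join ". " description_parts ++ "."

-- ===== PRECONDITION & SPEC =====
def Spec_build_personality_description (personality_traits : List String) (out : String) : Prop := out = build_personality_description_alt personality_traits
instance (personality_traits : List String) (out : String) : Decidable (Spec_build_personality_description personality_traits out) := by unfold Spec_build_personality_description; infer_instance

-- ===== CLAIM (what is proved, stated in full; the proofs are below) =====
def Claim_equal_build_personality_description : Prop := ∀ (personality_traits : List String), Dom_build_personality_description personality_traits → Spec_build_personality_description personality_traits (build_personality_description personality_traits)

-- ===== LEMMAS AND PROOFS =====

-- the five category vocabularies are pairwise disjoint: a trait in one is in no later one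
lemma pvSocial_disj (t : String) (h : t ∈ pvSocial) :
    t ∉ pvBehavioral ∧ t ∉ pvAffiliation ∧ t ∉ pvForce ∧ t ∉ pvProfession := by
  simp [pvSocial] at h
  rcases h with rfl | rfl | rfl | rfl | rfl | rfl <;> decide

lemma pvBehavioral_disj (t : String) (h : t ∈ pvBehavioral) :
    t ∉ pvAffiliation ∧ t ∉ pvForce ∧ t ∉ pvProfession := by
  simp [pvBehavioral] at h
  rcases h with rfl | rfl | rfl | rfl | rfl | rfl | rfl <;> decide

lemma pvAffiliation_disj (t : String) (h : t ∈ pvAffiliation) :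
    t ∉ pvForce ∧ t ∉ pvProfession := by
  simp [pvAffiliation] at h
  rcases h with rfl | rfl | rfl | rfl <;> decide

lemma pvForce_disj (t : String) (h : t ∈ pvForce) :
    t ∉ pvProfession := by
  simp [pvForce] at h
  rcases h with rfl | rfl | rfl | rfl | rfl <;> decide

-- B's single bucketing pass computes exactly A's five filters
lemma foldl_pvStep (ts : List String) (s b af f p : List String) :
    ts.foldl pvStep (s, b, af, f, p) =
      (s ++ ts.filter (fun t => pvSocial.contains t),
       b ++ ts.filter (fun t => pvBehavioral.contains t),
       af ++ ts.filter (fun t => pvAffiliation.contains t),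
       f ++ ts.filter (fun t => pvForce.contains t),
       p ++ ts.filter (fun t => pvProfession.contains t)) := by
  induction ts generalizing s b af f p with
  | nil => simp
  | cons t ts ih =>
    simp only [List.foldl_cons, List.filter_cons, pvStep]
    by_cases h1 : t ∈ pvSocial
    · obtain ⟨d1, d2, d3, d4⟩ := pvSocial_disj t h1
      simp [h1, d1, d2, d3, d4, ih]
    · by_cases h2 : t ∈ pvBehavioral
      · obtain ⟨d1, d2, d3⟩ := pvBehavioral_disj t h2
        simp [h1, h2, d1, d2, d3, ih]
      · by_cases h3 : t ∈ pvAffiliation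
        · obtain ⟨d1, d2⟩ := pvAffiliation_disj t h3
          simp [h1, h2, h3, d1, d2, ih]
        · by_cases h4 : t ∈ pvForce
          · have d1 := pvForce_disj t h4
            simp [h1, h2, h3, h4, d1, ih]
          · by_cases h5 : t ∈ pvProfession
            · simp [h1, h2, h3, h4, h5, ih]
            · simp [h1, h2, h3, h4, h5, ih]

-- ===== VERDICT (by name: the statement is the Claim_ definition above) =====
theorem build_personality_description_spec : Claim_equal_build_personality_description := by
  intro pts _
  unfold Spec_build_personality_description build_personality_description build_personality_description_alt
  by_cases hE : pts = []
  · simp [hE]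
  · simp only [if_neg hE]
    rw [foldl_pvStep]
    simp only [List.nil_append, List.foldl_cons, List.foldl_nil]
    have l1 : ("Socially" : String) ++ ": " = "Socially: " := rfl
    have l2 : ("Behavior" : String) ++ ": " = "Behavior: " := rfl
    have l3 : ("Affiliations" : String) ++ ": " = "Affiliations: " := rfl
    have l4 : ("Force connection" : String) ++ ": " = "Force connection: " := rfl
    have l5 : ("Profession" : String) ++ ": " = "Profession: " := rfl
    simp only [l1, l2, l3, l4, l5]
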